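-- pv_equiv track=rewrite | github.com/rochan743/time-and-complexity | 23.py | gennumber
-- ===== SOURCE A (Python) =====
-- def gennumber(n):
--     table_list = []
--     for num in range(n):
--         row=[]
--         for i in range(n):
--             row.append(i)
--         table_list.append(row)
--     return table_list
-- ===== SOURCE B (Python) =====
-- def gennumber(n):
--     # build one flat n*n buffer, then chop it into n row slices
--     flat = list(range(n)) * n
--     return [flat[k * n:(k + 1) * n] for k in range(n)]
-- ===== Notes on version B (the rewrite author's own statement) =====
-- stated objective: alternative
-- what changed: Builds a single flat buffer list(range(n))*n and chops it into n row slices, instead of growing each row element-by-element with nested append loops.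
import Mathlib
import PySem

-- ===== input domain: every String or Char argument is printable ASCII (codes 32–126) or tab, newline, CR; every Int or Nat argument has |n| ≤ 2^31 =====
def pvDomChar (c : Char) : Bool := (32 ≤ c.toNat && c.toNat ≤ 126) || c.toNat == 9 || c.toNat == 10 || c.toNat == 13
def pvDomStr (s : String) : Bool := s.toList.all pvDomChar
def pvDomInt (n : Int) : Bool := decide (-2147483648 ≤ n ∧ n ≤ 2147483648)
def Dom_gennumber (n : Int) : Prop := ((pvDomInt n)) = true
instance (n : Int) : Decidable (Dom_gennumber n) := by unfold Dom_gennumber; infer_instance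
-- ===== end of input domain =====

-- B builds one flat list(range(n))*n buffer and chops it into n row slices, instead of growing each row element-by-element; alternative decomposition, same cost.

-- ===== PORT A =====
def gennumber (n : Int) : List (List Int) :=
  (PySem.List.pyRange 0 n 1).foldl
    (fun table_list _num =>
      table_list ++ [(PySem.List.pyRange 0 n 1).foldl (fun row i => row ++ [i]) []])
    []

-- ===== PORT B =====
-- 'list(range(n)) * n' : Python sequence repetition — n concatenated copies, [] for n ≤ 0
-- (exact: List.replicate n.toNat … |>.flatten gives n copies for n > 0 and [] for n ≤ 0);
-- 'flat[k*n:(k+1)*n]' → PySem.List.slice (exact Python slice semantics).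
def gennumber_alt (n : Int) : List (List Int) :=
  let flat := (List.replicate n.toNat (PySem.List.pyRange 0 n 1)).flatten
  (PySem.List.pyRange 0 n 1).map
    (fun k => PySem.List.slice flat (some (k * n)) (some ((k + 1) * n)))

-- ===== PRECONDITION & SPEC =====
def Spec_gennumber (n : Int) (out : List (List Int)) : Prop := out = gennumber_alt n
instance (n : Int) (out : List (List Int)) : Decidable (Spec_gennumber n out) := by unfold Spec_gennumber; infer_instance

-- ===== CLAIM =====
def Claim_equal_gennumber : Prop := ∀ (n : Int), Dom_gennumber n → Spec_gennumber n (gennumber n)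

-- ===== LEMMAS AND PROOFS =====

theorem foldl_append_singleton (l : List Int) (acc : List Int) :
    l.foldl (fun row i => row ++ [i]) acc = acc ++ l := by
  induction l generalizing acc with
  | nil => simp
  | cons x xs ih => simp [List.foldl, ih, List.append_assoc]

theorem foldl_append_const (l : List Int) (c : List Int) (acc : List (List Int)) :
    l.foldl (fun t _ => t ++ [c]) acc = acc ++ l.map (fun _ => c) := by
  induction l generalizing acc with
  | nil => simp
  | cons x xs ih => simp [List.foldl, ih, List.append_assoc]

-- dropping k whole chunks then taking one chunk from a flattened replicate gives the chunk back
theorem flatten_replicate_chunk (L : List Int) (k : Nat) :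
    ∀ (c : Nat), k < c →
      (((List.replicate c L).flatten.drop (k * L.length)).take L.length) = L := by
  induction k with
  | zero =>
    intro c hc
    obtain ⟨c', rfl⟩ := Nat.exists_eq_succ_of_ne_zero (by omega : c ≠ 0)
    simp [List.replicate_succ, List.take_left]
  | succ k ih =>
    intro c hc
    obtain ⟨c', rfl⟩ := Nat.exists_eq_succ_of_ne_zero (by omega : c ≠ 0)
    have hstep :
        ((List.replicate (c' + 1) L).flatten).drop ((k + 1) * L.length)
          = ((List.replicate c' L).flatten).drop (k * L.length) := by
      rw [List.replicate_succ, List.flatten_cons,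
        show (k + 1) * L.length = L.length + k * L.length by ring,
        ← List.drop_drop, List.drop_left]
    rw [hstep]
    exact ih c' (by omega)

-- ===== VERDICT =====
theorem gennumber_spec : Claim_equal_gennumber := by
  intro n _
  unfold Spec_gennumber gennumber gennumber_alt
  simp only [foldl_append_singleton, List.nil_append]
  rw [foldl_append_const (PySem.List.pyRange 0 n 1) (PySem.List.pyRange 0 n 1) [],
    List.nil_append]
  refine (List.map_congr_left ?_).symm
  intro k hk
  obtain ⟨hk0, hkn⟩ := (PySem.List.mem_pyRange_one).1 hk
  -- move to natural-number bounds
  obtain ⟨k', rfl⟩ := Int.eq_ofNat_of_zero_le hk0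
  obtain ⟨m, rfl⟩ := Int.eq_ofNat_of_zero_le (le_trans hk0 (le_of_lt hkn))
  have hkm : k' < m := by exact_mod_cast hkn
  have h1 : ((k' : Int) * (m : Int)) = ((k' * m : Nat) : Int) := by push_cast; ring
  have h2 : (((k' : Int) + 1) * (m : Int)) = ((k' * m : Nat) : Int) + ((m : Nat) : Int) := by
    push_cast; ring
  rw [h1, h2, PySem.List.slice_natCast_add]
  have hlen : (PySem.List.pyRange 0 (m : Int) 1).length = m := by
    rw [PySem.List.length_pyRange_one]; omega
  calc ((List.replicate (m : Int).toNat (PySem.List.pyRange 0 (m : Int) 1)).flatten.drop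
          (k' * m)).take m
      = ((List.replicate m (PySem.List.pyRange 0 (m : Int) 1)).flatten.drop
          (k' * (PySem.List.pyRange 0 (m : Int) 1).length)).take
          (PySem.List.pyRange 0 (m : Int) 1).length := by rw [hlen, Int.toNat_natCast]
    _ = PySem.List.pyRange 0 (m : Int) 1 :=
        flatten_replicate_chunk (PySem.List.pyRange 0 (m : Int) 1) k' m hkm
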